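-- pv_equiv track=rewrite | github.com/alac/txt_to_dataset | processors/analyze_writing.py | edit_few_shot_request
-- ===== SOURCE A (Python) =====
-- def edit_few_shot_request(prompt: str, remove_keys: list[str]) -> str:
--     all_examples = parse_few_shot_format(prompt)
--     result_lines = []
--     for index, example in enumerate(all_examples):
--         for key in example:
--             if key in remove_keys:
--                 continue
--             result_lines.append(f">{key}: " + example[key])
--         if index != len(all_examples) - 1:
--             result_lines.append("")  # the join will turn this into a blank line
--
--     return "\n".join(result_lines)
--
-- def parse_few_shot_format(prompt) -> list[dict]:
--     example = {}
--     all_examples = [example]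
--     last_key = None
--     for line in prompt.splitlines():
--         if len(line.strip()) == 0:
--             if len(example.keys()):
--                 example = {}
--                 all_examples.append(example)
--                 last_key = None
--         elif line.startswith(">") and ":" in line:
--             line = line[1:]
--             key, value = line.split(":", 1)
--             last_key = key.strip()
--             if value.startswith(" "):
--                 value = value[1:]
--             example[last_key] = value
--         elif last_key is not None:
--             example[last_key] += "\n" + line
--     return all_examples
-- ===== SOURCE B (Python) =====
-- def edit_few_shot_request(prompt: str, remove_keys: list[str]) -> str:
--     # Single streaming pass: each example is flushed to the output as soon as a
--     # blank line closes it; no intermediate list of all examples is built.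
--     out = []
--     example = {}
--     last_key = None
--     for line in prompt.splitlines():
--         if not line.strip():
--             if example:
--                 out.extend(f">{k}: {v}" for k, v in example.items() if k not in remove_keys)
--                 out.append("")
--                 example = {}
--                 last_key = None
--         elif line.startswith(">") and ":" in line:
--             key, value = line[1:].split(":", 1)
--             last_key = key.strip()
--             example[last_key] = value[1:] if value.startswith(" ") else value
--         elif last_key is not None:
--             example[last_key] += "\n" + line
--     out.extend(f">{k}: {v}" for k, v in example.items() if k not in remove_keys)
--     return "\n".join(out)
-- ===== Notes on version B (the rewrite author's own statement) =====
-- stated objective: alternative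
-- what changed: B is a single streaming pass that flushes each example's filtered lines (plus the blank separator) to the output the moment a blank line closes it, instead of A's two phases that first build the full list of example dicts and then rebuild with enumerate/index bookkeeping.
import Mathlib
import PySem

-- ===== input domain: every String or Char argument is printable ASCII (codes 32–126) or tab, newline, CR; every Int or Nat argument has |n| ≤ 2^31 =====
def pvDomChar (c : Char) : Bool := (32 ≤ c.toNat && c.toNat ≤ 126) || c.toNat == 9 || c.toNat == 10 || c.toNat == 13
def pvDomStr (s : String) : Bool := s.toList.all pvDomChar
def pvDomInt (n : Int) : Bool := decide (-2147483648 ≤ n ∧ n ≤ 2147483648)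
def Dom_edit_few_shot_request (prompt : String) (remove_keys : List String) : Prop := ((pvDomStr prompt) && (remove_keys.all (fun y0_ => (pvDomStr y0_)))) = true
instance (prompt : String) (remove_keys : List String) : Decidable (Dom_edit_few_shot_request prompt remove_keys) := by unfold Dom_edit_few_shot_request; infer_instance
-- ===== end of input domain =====

-- B replaces A's parse-all-then-rebuild structure by one streaming pass that flushes each
-- closed example directly to the output list (alternative decomposition, same cost).

-- ===== PORT A =====
-- one iteration of the loop in parse_few_shot_format; state = (finished examples, current example, last_key)
def pvLineA (st : List (PySem.Dict String String) × PySem.Dict String String × Option String)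
    (line : String) : List (PySem.Dict String String) × PySem.Dict String String × Option String :=
  if PySem.Str.len (PySem.Str.strip line) = 0 then
    if st.2.1.keys.length ≠ 0 then (st.1 ++ [st.2.1], PySem.Dict.empty, none) else st
  else if PySem.Str.startswith line ">" && PySem.Str.isIn ":" line then
    match PySem.Str.splitMax? (PySem.Str.slice line (some 1) none) ":" 1 with
    | some (k :: v :: _) =>
        let key := PySem.Str.strip k
        let value := if PySem.Str.startswith v " " then PySem.Str.slice v (some 1) none else v
        (st.1, st.2.1.insert key value, some key)
    | _ => st  -- unreachable: split(":", 1) on a string containing ":" yields two pieces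
  else
    match st.2.2 with
    | some k => (st.1, st.2.1.modify k "" (fun v => v ++ "\n" ++ line), st.2.2)
    | none => st

-- parse_few_shot_format: all_examples always ends with the current (mutable) example
def parse_few_shot_format (prompt : String) : List (PySem.Dict String String) :=
  let st := (PySem.Str.splitlines prompt).foldl pvLineA ([], PySem.Dict.empty, none)
  st.1 ++ [st.2.1]

def edit_few_shot_request (prompt : String) (remove_keys : List String) : String :=
  let all_examples := parse_few_shot_format prompt
  let result_lines := (PySem.List.enumerate all_examples).foldl
    (fun acc p =>
      let acc := p.2.keys.foldl
        (fun a k => if remove_keys.contains k then a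
                    else a ++ [">" ++ k ++ ": " ++ p.2.getD k ""]) acc
      if p.1 ≠ (all_examples.length : Int) - 1 then acc ++ [""] else acc) []
  PySem.Str.join "\n" result_lines

-- ===== PORT B =====
-- the filtered lines of one example (B's comprehension over example.items())
def pvEmit (remove_keys : List String) (ex : PySem.Dict String String) : List String :=
  (ex.items.filter (fun kv => !remove_keys.contains kv.1)).map
    (fun kv => ">" ++ kv.1 ++ ": " ++ kv.2)

-- one iteration of B's streaming loop; state = (output lines so far, current example, last_key)
def pvLineB (remove_keys : List String)
    (st : List String × PySem.Dict String String × Option String)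
    (line : String) : List String × PySem.Dict String String × Option String :=
  if PySem.Str.len (PySem.Str.strip line) = 0 then
    if st.2.1.size ≠ 0 then
      (st.1 ++ pvEmit remove_keys st.2.1 ++ [""], PySem.Dict.empty, none)
    else st
  else if PySem.Str.startswith line ">" && PySem.Str.isIn ":" line then
    match PySem.Str.splitMax? (PySem.Str.slice line (some 1) none) ":" 1 with
    | some (k :: v :: _) =>
        let key := PySem.Str.strip k
        let value := if PySem.Str.startswith v " " then PySem.Str.slice v (some 1) none else v
        (st.1, st.2.1.insert key value, some key)
    | _ => st  -- unreachable, as in A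
  else
    match st.2.2 with
    | some k => (st.1, st.2.1.modify k "" (fun v => v ++ "\n" ++ line), st.2.2)
    | none => st

def edit_few_shot_request_alt (prompt : String) (remove_keys : List String) : String :=
  let st := (PySem.Str.splitlines prompt).foldl (pvLineB remove_keys) ([], PySem.Dict.empty, none)
  PySem.Str.join "\n" (st.1 ++ pvEmit remove_keys st.2.1)

-- ===== PRECONDITION & SPEC =====
def Spec_edit_few_shot_request (prompt : String) (remove_keys : List String) (out : String) : Prop := out = edit_few_shot_request_alt prompt remove_keys
instance (prompt : String) (remove_keys : List String) (out : String) : Decidable (Spec_edit_few_shot_request prompt remove_keys out) := by unfold Spec_edit_few_shot_request; infer_instance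

-- ===== CLAIM (what is proved, stated in full; the proofs are below) =====
def Claim_equal_edit_few_shot_request : Prop := ∀ (prompt : String) (remove_keys : List String), Dom_edit_few_shot_request prompt remove_keys → Spec_edit_few_shot_request prompt remove_keys (edit_few_shot_request prompt remove_keys)

-- ===== LEMMAS AND PROOFS =====

-- A's inner key loop over one example equals B's filtered comprehension, given unique keys
theorem pvEmit_eq (rk : List String) (ex : PySem.Dict String String)
    (hnd : ex.keys.Nodup) (acc : List String) :
    ex.keys.foldl
      (fun a k => if rk.contains k then a else a ++ [">" ++ k ++ ": " ++ ex.getD k ""]) acc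
    = acc ++ pvEmit rk ex := by
  have hflip : (fun (a : List String) (k : String) =>
      if rk.contains k then a else a ++ [">" ++ k ++ ": " ++ ex.getD k ""])
      = fun a k => if !rk.contains k then a ++ [">" ++ k ++ ": " ++ ex.getD k ""] else a := by
    funext a k; cases h : rk.contains k <;> simp
  rw [hflip, PySem.List.foldl_append_if, pvEmit,
    PySem.Dict.items_eq_map_keys ex hnd "", List.filter_map, List.map_map]
  rfl

-- A's enumerate/index rebuild over completed examples plus the final one
theorem pvRebuild_eq (rk : List String) :
    ∀ (comp : List (PySem.Dict String String)) (cur : PySem.Dict String String)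
      (s n : Int) (acc : List String),
      (∀ d ∈ comp, d.keys.Nodup) → cur.keys.Nodup → n = s + comp.length + 1 →
      (PySem.List.enumerate (comp ++ [cur]) s).foldl
        (fun acc p =>
          if p.1 ≠ n - 1 then
            (p.2.keys.foldl
              (fun a k => if rk.contains k then a
                          else a ++ [">" ++ k ++ ": " ++ p.2.getD k ""]) acc) ++ [""]
          else
            p.2.keys.foldl
              (fun a k => if rk.contains k then a
                          else a ++ [">" ++ k ++ ": " ++ p.2.getD k ""]) acc) acc
      = acc ++ comp.flatMap (fun d => pvEmit rk d ++ [""]) ++ pvEmit rk cur := by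
  intro comp
  induction comp with
  | nil =>
    intro cur s n acc _ hcur hn
    simp only [List.nil_append, PySem.List.enumerate_cons, PySem.List.enumerate_nil,
      List.foldl_cons, List.foldl_nil, List.flatMap_nil]
    simp only [List.length_nil, Nat.cast_zero] at hn
    have hs : ¬ (s ≠ n - 1) := by omega
    simp only [hs, if_false]
    rw [pvEmit_eq rk cur hcur acc]
    simp
  | cons d ds ih =>
    intro cur s n acc hc hcur hn
    simp only [List.cons_append, PySem.List.enumerate_cons, List.foldl_cons]
    have hne : s ≠ n - 1 := by
      push_cast [List.length_cons] at hn
      have : (0:Int) ≤ (ds.length : Int) := by positivity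
      omega
    simp only [hne, ne_eq, not_false_eq_true, if_true]
    rw [pvEmit_eq rk d (hc d (by simp)) acc]
    rw [ih cur (s + 1) n (acc ++ pvEmit rk d ++ [""])
      (fun e he => hc e (by simp [he])) hcur (by push_cast [List.length_cons] at hn ⊢; omega)]
    simp

-- the two folds run in lockstep: same current example and last_key, and B's output is
-- exactly the flush of A's finished examples; keys stay unique throughout
theorem pvSim (rk : List String) :
    ∀ (lines : List String) (comp : List (PySem.Dict String String))
      (ex : PySem.Dict String String) (lk : Option String) (out : List String),
      ex.keys.Nodup → (∀ d ∈ comp, d.keys.Nodup) →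
      out = comp.flatMap (fun d => pvEmit rk d ++ [""]) →
      (lines.foldl (pvLineB rk) (out, ex, lk)).1
          = (lines.foldl pvLineA (comp, ex, lk)).1.flatMap (fun d => pvEmit rk d ++ [""])
        ∧ (lines.foldl (pvLineB rk) (out, ex, lk)).2 = (lines.foldl pvLineA (comp, ex, lk)).2
        ∧ (lines.foldl pvLineA (comp, ex, lk)).2.1.keys.Nodup
        ∧ (∀ d ∈ (lines.foldl pvLineA (comp, ex, lk)).1, d.keys.Nodup) := by
  intro lines
  induction lines with
  | nil =>
    intro comp ex lk out hex hc hout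
    exact ⟨hout, rfl, hex, hc⟩
  | cons line ls ih =>
    intro comp ex lk out hex hc hout
    simp only [List.foldl_cons]
    by_cases hb : PySem.Str.len (PySem.Str.strip line) = 0
    · have hsz : PySem.Dict.size ex = ex.keys.length := by
        simp [PySem.Dict.size, PySem.Dict.keys]
      by_cases hk : ex.keys.length ≠ 0
      · have hA : pvLineA (comp, ex, lk) line = (comp ++ [ex], PySem.Dict.empty, none) := by
          rw [pvLineA.eq_def]
          rw [if_pos hb, if_pos hk]
        have hB : pvLineB rk (out, ex, lk) line
            = (out ++ pvEmit rk ex ++ [""], PySem.Dict.empty, none) := by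
          rw [pvLineB.eq_def]
          rw [if_pos hb, if_pos (by rw [hsz]; exact hk)]
        rw [hA, hB]
        refine ih (comp ++ [ex]) PySem.Dict.empty none _ PySem.Dict.nodup_keys_empty ?_ ?_
        · intro d hd
          rcases List.mem_append.1 hd with h | h
          · exact hc d h
          · simp only [List.mem_singleton] at h; subst h; exact hex
        · simp [hout]
      · have hA : pvLineA (comp, ex, lk) line = (comp, ex, lk) := by
          rw [pvLineA.eq_def]
          rw [if_pos hb, if_neg hk]
        have hB : pvLineB rk (out, ex, lk) line = (out, ex, lk) := by
          rw [pvLineB.eq_def]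
          rw [if_pos hb, if_neg (by rw [hsz]; exact hk)]
        rw [hA, hB]
        exact ih comp ex lk out hex hc hout
    · by_cases hkv : (PySem.Str.startswith line ">" && PySem.Str.isIn ":" line) = true
      · rcases hsp : PySem.Str.splitMax? (PySem.Str.slice line (some 1) none) ":" 1
          with _ | (_ | ⟨k, _ | ⟨v, rest⟩⟩)
        · have hA : pvLineA (comp, ex, lk) line = (comp, ex, lk) := by
            rw [pvLineA.eq_def]
            rw [if_neg hb, if_pos hkv, hsp]
          have hB : pvLineB rk (out, ex, lk) line = (out, ex, lk) := by
            rw [pvLineB.eq_def]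
            rw [if_neg hb, if_pos hkv, hsp]
          rw [hA, hB]
          exact ih comp ex lk out hex hc hout
        · have hA : pvLineA (comp, ex, lk) line = (comp, ex, lk) := by
            rw [pvLineA.eq_def]
            rw [if_neg hb, if_pos hkv, hsp]
          have hB : pvLineB rk (out, ex, lk) line = (out, ex, lk) := by
            rw [pvLineB.eq_def]
            rw [if_neg hb, if_pos hkv, hsp]
          rw [hA, hB]
          exact ih comp ex lk out hex hc hout
        · have hA : pvLineA (comp, ex, lk) line = (comp, ex, lk) := by
            rw [pvLineA.eq_def]
            rw [if_neg hb, if_pos hkv, hsp]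
          have hB : pvLineB rk (out, ex, lk) line = (out, ex, lk) := by
            rw [pvLineB.eq_def]
            rw [if_neg hb, if_pos hkv, hsp]
          rw [hA, hB]
          exact ih comp ex lk out hex hc hout
        · have hA : pvLineA (comp, ex, lk) line
              = (comp, ex.insert (PySem.Str.strip k)
                  (if PySem.Str.startswith v " " then PySem.Str.slice v (some 1) none else v),
                 some (PySem.Str.strip k)) := by
            rw [pvLineA.eq_def]
            rw [if_neg hb, if_pos hkv, hsp]
          have hB : pvLineB rk (out, ex, lk) line
              = (out, ex.insert (PySem.Str.strip k)
                  (if PySem.Str.startswith v " " then PySem.Str.slice v (some 1) none else v),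
                 some (PySem.Str.strip k)) := by
            rw [pvLineB.eq_def]
            rw [if_neg hb, if_pos hkv, hsp]
          rw [hA, hB]
          exact ih comp _ _ out (PySem.Dict.nodup_keys_insert _ _ _ hex) hc hout
      · rcases lk with _ | key
        · have hA : pvLineA (comp, ex, none) line = (comp, ex, none) := by
            rw [pvLineA.eq_def]
            rw [if_neg hb, if_neg hkv]
          have hB : pvLineB rk (out, ex, none) line = (out, ex, none) := by
            rw [pvLineB.eq_def]
            rw [if_neg hb, if_neg hkv]
          rw [hA, hB]
          exact ih comp ex none out hex hc hout
        · have hA : pvLineA (comp, ex, some key) line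
              = (comp, ex.modify key "" (fun v => v ++ "\n" ++ line), some key) := by
            rw [pvLineA.eq_def]
            rw [if_neg hb, if_neg hkv]
          have hB : pvLineB rk (out, ex, some key) line
              = (out, ex.modify key "" (fun v => v ++ "\n" ++ line), some key) := by
            rw [pvLineB.eq_def]
            rw [if_neg hb, if_neg hkv]
          rw [hA, hB]
          refine ih comp _ _ out ?_ hc hout
          rw [PySem.Dict.keys_modify]
          exact PySem.Dict.nodup_keys_insert _ _ _ hex

-- ===== VERDICT (by name: the statement is the Claim_ definition above) =====
theorem edit_few_shot_request_spec : Claim_equal_edit_few_shot_request := by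
  intro prompt rk _
  show edit_few_shot_request prompt rk = edit_few_shot_request_alt prompt rk
  obtain ⟨h1, h2, h3, h4⟩ := pvSim rk (PySem.Str.splitlines prompt) [] PySem.Dict.empty none []
    PySem.Dict.nodup_keys_empty (by simp) (by simp)
  simp only [edit_few_shot_request, edit_few_shot_request_alt]
  generalize hP : parse_few_shot_format prompt = P
  have hP' : P = ((PySem.Str.splitlines prompt).foldl pvLineA ([], PySem.Dict.empty, none)).1
      ++ [((PySem.Str.splitlines prompt).foldl pvLineA ([], PySem.Dict.empty, none)).2.1] := by
    rw [← hP]; rfl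
  subst hP'
  rw [pvRebuild_eq rk ((PySem.Str.splitlines prompt).foldl pvLineA ([], PySem.Dict.empty, none)).1
    ((PySem.Str.splitlines prompt).foldl pvLineA ([], PySem.Dict.empty, none)).2.1 0
    ((((PySem.Str.splitlines prompt).foldl pvLineA ([], PySem.Dict.empty, none)).1
        ++ [((PySem.Str.splitlines prompt).foldl pvLineA ([], PySem.Dict.empty, none)).2.1]).length : Int)
    [] h4 h3 (by push_cast [List.length_append]; simp)]
  rw [h1, h2]
  simp
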